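-- pv_equiv track=rewrite | github.com/louismaillet/BUT1 | semestre1/test/init_system_2/TP8/fetide_adams.py | plus_cher
-- ===== SOURCE A (Python) =====
-- def plus_cher(course) :
--     """
--     renvoie l'article le plus cher de la liste de course
--     Args:
--         course (list): liste des articles
--     Returns:
--         article (str): article le plus cher
--     """
--     if len(course) == 0 :
--         return None
--     article = course[0]
--     prix = course[0][1]
--     for i in range(len(course)) :
--         if course[i][1] > prix :
--             article = course[i]
--             prix = course[i][1]
--     return article[0]
-- ===== SOURCE B (Python) =====
-- def plus_cher(course):
--     """
--     renvoie l'article le plus cher de la liste de course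
--     """
--     if not course:
--         return None
--     ordered = sorted(course, key=lambda a: a[1], reverse=True)
--     return ordered[0][0]
-- ===== Notes on version B (the rewrite author's own statement) =====
-- stated objective: idiomatic
-- what changed: Replaces the manual index loop with running max state by a stable descending sort on price (reverse=True keeps the first-occurring article among equal max prices) and taking the first element.
import Mathlib
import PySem

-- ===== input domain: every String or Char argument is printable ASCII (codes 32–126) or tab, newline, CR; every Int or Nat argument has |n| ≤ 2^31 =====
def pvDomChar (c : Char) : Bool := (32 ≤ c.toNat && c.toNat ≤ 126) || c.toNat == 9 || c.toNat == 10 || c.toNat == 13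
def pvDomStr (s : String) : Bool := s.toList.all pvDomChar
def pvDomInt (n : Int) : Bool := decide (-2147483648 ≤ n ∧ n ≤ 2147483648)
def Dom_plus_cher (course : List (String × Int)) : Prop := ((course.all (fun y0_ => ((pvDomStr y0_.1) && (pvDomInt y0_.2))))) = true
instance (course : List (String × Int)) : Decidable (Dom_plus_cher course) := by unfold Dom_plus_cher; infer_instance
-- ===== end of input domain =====

-- B replaces A's manual index loop by a stable descending sort on price and takes the first element (idiomatic; not faster).


-- ===== PORT A =====
-- loop over range(len(course)); course[i] is always in range here, so the pyGetD default is never used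
def plus_cher (course : List (String × Int)) : Option String :=
  if PySem.List.len course = 0 then none
  else
    let article := PySem.List.pyGetD course 0 ("", 0)
    let prix := article.2
    let fin := (PySem.List.pyRange 0 (PySem.List.len course)).foldl
      (fun (s : (String × Int) × Int) i =>
        let x := PySem.List.pyGetD course i ("", 0)
        if x.2 > s.2 then (x, x.2) else s) (article, prix)
    some fin.1.1

-- ===== PORT B =====
def plus_cher_alt (course : List (String × Int)) : Option String :=
  if course.isEmpty then none
  else
    let ordered := PySem.List.sorted course (fun a => a.2) true
    match ordered with
    | [] => none
    | m :: _ => some m.1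

-- ===== PRECONDITION & SPEC =====
def Spec_plus_cher (course : List (String × Int)) (out : Option String) : Prop := out = plus_cher_alt course
instance (course : List (String × Int)) (out : Option String) : Decidable (Spec_plus_cher course out) := by unfold Spec_plus_cher; infer_instance

-- ===== CLAIM (what is proved, stated in full; the proofs are below) =====
def Claim_equal_plus_cher : Prop := ∀ (course : List (String × Int)), Dom_plus_cher course → Spec_plus_cher course (plus_cher course)

-- ===== LEMMAS AND PROOFS =====

-- inserting x into a nonempty descending list: the new head is the strict-max of the old head and x
theorem pv_insertBy_cons (x m : String × Int) (rest : List (String × Int)) :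
    PySem.List.insertBy (fun a b => decide (b.2 < a.2)) x (m :: rest)
      = if m.2 < x.2 then x :: m :: rest
        else m :: PySem.List.insertBy (fun a b => decide (b.2 < a.2)) x rest := by
  simp [PySem.List.insertBy]

-- the head of the insertion-sort fold is A's running strict-greater maximum
theorem pv_head_foldl_ins (t : List (String × Int)) :
    ∀ (m : String × Int) (rest : List (String × Int)),
    ((t.foldl (fun acc x => PySem.List.insertBy (fun a b => decide (b.2 < a.2)) x acc) (m :: rest))).head?
      = some (t.foldl (fun a x => if a.2 < x.2 then x else a) m) := by
  induction t with
  | nil => intro m rest; rfl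
  | cons x t ih =>
    intro m rest
    simp only [List.foldl_cons, pv_insertBy_cons]
    by_cases h : m.2 < x.2
    · simp [h, ih]
    · simp [h, ih]

-- A's pair-state loop over the elements computes the same running maximum
theorem pv_foldl_pair (t : List (String × Int)) :
    ∀ (a : String × Int),
    (t.foldl (fun (s : (String × Int) × Int) x => if x.2 > s.2 then (x, x.2) else s) (a, a.2)).1
      = t.foldl (fun a x => if a.2 < x.2 then x else a) a := by
  induction t with
  | nil => intro a; rfl
  | cons x t ih =>
    intro a
    simp only [List.foldl_cons, gt_iff_lt]
    by_cases h : a.2 < x.2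
    · simp [h, ih]
    · simp [h, ih]

-- ===== VERDICT (by name: the statement is the Claim_ definition above) =====
theorem plus_cher_spec : Claim_equal_plus_cher := by
  intro course _
  unfold Spec_plus_cher plus_cher plus_cher_alt
  cases course with
  | nil => rfl
  | cons h t =>
    have hlen : PySem.List.len (h :: t) ≠ 0 := by
      simp only [PySem.List.len, List.length_cons]
      omega
    rw [if_neg hlen]
    simp only [List.isEmpty_cons, if_false, Bool.false_eq_true]
    -- A's range loop = fold over the elements
    rw [PySem.List.foldl_pyRange_pyGetD (h :: t) ("", 0)
      (fun (s : (String × Int) × Int) x => if x.2 > s.2 then (x, x.2) else s) _ (le_refl 0)]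
    simp only [Int.toNat_zero, List.drop_zero]
    -- B's head of sorted
    rw [PySem.List.sorted_rev_eq_foldl_insertBy]
    -- first fold step of A: comparing h with itself does nothing
    have hA : ((h :: t).foldl (fun (s : (String × Int) × Int) x => if x.2 > s.2 then (x, x.2) else s)
        (PySem.List.pyGetD (h :: t) 0 ("", 0), (PySem.List.pyGetD (h :: t) 0 ("", 0)).2)).1
        = t.foldl (fun a x => if a.2 < x.2 then x else a) h := by
      have hget : PySem.List.pyGetD (h :: t) 0 ("", 0) = h := by
        simp [PySem.List.pyGetD, PySem.List.pyGet?, PySem.List.pyIdx?]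
      rw [hget]
      simp only [List.foldl_cons, gt_iff_lt, lt_self_iff_false, if_false]
      exact pv_foldl_pair t h
    rw [hA]
    have hfirst : PySem.List.insertBy (fun a b => decide (b.2 < a.2)) h ([] : List (String × Int)) = [h] := by
      simp [PySem.List.insertBy]
    simp only [List.foldl_cons, hfirst]
    have hL := pv_head_foldl_ins t h []
    cases hE : (t.foldl (fun acc x => PySem.List.insertBy (fun a b => decide (b.2 < a.2)) x acc) [h]) with
    | nil => rw [hE] at hL; simp at hL
    | cons m r =>
      rw [hE] at hL
      simp only [List.head?_cons, Option.some.injEq] at hL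
      rw [hL]
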